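-- pv_equiv track=rewrite | github.com/jmussamuhindo/GameTheory_Project | pg.py | calculate_even_nim
-- ===== SOURCE A (Python) =====
-- def mex(s):
--     """Calculate the Minimum EXcludant of a set of numbers."""
--     m = 0
--     while m in s:
--         m += 1
--     return m
--
-- def calculate_even_nim(n):
--     """Calculate the nimbers for Even-Nim up to size n."""
--     even_nim = [0] * (n + 1)  # Initialize the nimber list with zeroes
--     for i in range(2, n + 1):  # Starts from 2 since 0 and 1 are special cases
--         reachable = set()
--         # Iterate over possible even moves
--         for move in range(2, i + 1, 2):
--             if i - move >= 0:
--                 reachable.add(even_nim[i - move])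
--         even_nim[i] = mex(reachable)
--     # Single stone is a terminal position in Even-Nim
--     even_nim[1] = 0
--     return even_nim
-- ===== SOURCE B (Python) =====
-- def calculate_even_nim(n):
--     """Calculate the nimbers for Even-Nim up to size n."""
--     # Closed form: the nimber of a pile of i stones under even-sized moves is i // 2.
--     return [i // 2 for i in range(n + 1)]
-- ===== Notes on version B (the rewrite author's own statement) =====
-- stated objective: faster
-- what changed: Replaces the quadratic mex/reachable-set dynamic programming by the closed form nimber(i) = i // 2, emitted in one linear list comprehension.
-- outside the precondition, e.g. on calculate_even_nim(0): A raises IndexError, B returns [0]; on calculate_even_nim(-3): A raises IndexError, B returns []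
import Mathlib
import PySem

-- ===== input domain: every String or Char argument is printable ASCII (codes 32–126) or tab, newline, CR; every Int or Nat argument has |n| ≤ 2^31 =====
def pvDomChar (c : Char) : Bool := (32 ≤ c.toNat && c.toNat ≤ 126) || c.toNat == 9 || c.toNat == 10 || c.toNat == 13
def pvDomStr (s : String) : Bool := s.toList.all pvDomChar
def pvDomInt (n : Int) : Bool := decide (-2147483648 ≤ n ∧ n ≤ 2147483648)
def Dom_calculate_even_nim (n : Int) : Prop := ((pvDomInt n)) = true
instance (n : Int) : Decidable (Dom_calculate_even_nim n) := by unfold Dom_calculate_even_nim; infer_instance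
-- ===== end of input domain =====

-- B replaces A's quadratic mex-of-reachable-set DP by the closed form nimber(i) = i // 2 (one linear pass).


-- ===== PORT A =====
-- Python's set is a hash set; Std.HashSet Int models it exactly here (it is consumed only by
-- membership tests, which are order-independent).  Python's 'while m in s: m += 1' is totalised
-- with fuel; fuel = s.size + 1 is provably enough (the mex of a finite set s is at most |s|),
-- so the value is Python's exactly.
def pvMexAux (s : Std.HashSet Int) : Nat → Int → Int
  | 0, m => m
  | fuel + 1, m => if s.contains m then pvMexAux s fuel (m + 1) else m

-- mex(s) of Source A
def pvMex (s : Std.HashSet Int) : Int := pvMexAux s (s.size + 1) 0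

-- body of the outer 'for i in range(2, n + 1)' loop of Source A; the table is an Array Int (a Python
-- list IS an array).  Whenever this body runs, 2 ≤ i ≤ n < en.size, and the read index i - move
-- satisfies 0 ≤ i - move < i (the 'if i - move >= 0' guard is Python's own), so '.toNat' and the
-- getD default never deviate from Python's even_nim[i - move] / even_nim[i] = ….
def pvStepA (en : Array Int) (i : Int) : Array Int :=
  en.setIfInBounds i.toNat (pvMex
    ((PySem.List.pyRange 2 (i + 1) 2).foldl
      (fun r move => if 0 ≤ i - move then r.insert (en.getD (i - move).toNat 0) else r)
      (∅ : Std.HashSet Int)))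

-- For n < 1 the final 'even_nim[1] = 0' raises IndexError in Python (the list is too short) —
-- exactly what Pre_ excludes; setIfInBounds is a no-op there.
def calculate_even_nim (n : Int) : List Int :=
  let even_nim := Array.replicate (n + 1).toNat (0 : Int)
  let even_nim := (PySem.List.pyRange 2 (n + 1) 1).foldl pvStepA even_nim
  (even_nim.setIfInBounds 1 0).toList

-- ===== PORT B =====
def calculate_even_nim_alt (n : Int) : List Int :=
  (PySem.List.pyRange 0 (n + 1) 1).map (fun i => PySem.Int.floordiv i 2)

-- ===== PRECONDITION & SPEC =====
-- Pre_ excludes exactly n ≤ 0, where A raises IndexError on the final 'even_nim[1] = 0'.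
def Pre_calculate_even_nim (n : Int) : Prop := 1 ≤ n
instance (n : Int) : Decidable (Pre_calculate_even_nim n) := by unfold Pre_calculate_even_nim; infer_instance
def pvWitness_calculate_even_nim : Int := (3)

def Spec_calculate_even_nim (n : Int) (out : List Int) : Prop := out = calculate_even_nim_alt n
instance (n : Int) (out : List Int) : Decidable (Spec_calculate_even_nim n out) := by unfold Spec_calculate_even_nim; infer_instance

-- ===== CLAIM (what is proved, stated in full; the proofs are below) =====
def Claim_equal_calculate_even_nim : Prop := ∀ (n : Int), Dom_calculate_even_nim n → Pre_calculate_even_nim n → Spec_calculate_even_nim n (calculate_even_nim n)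

-- ===== LEMMAS AND PROOFS =====

-- closed form for the DP table after the loop has processed i = 2 .. k-1
def pvCf (n k : Int) : List Int :=
  (PySem.List.pyRange 0 (n + 1) 1).map
    (fun j => if 2 ≤ j ∧ j < k then PySem.Int.floordiv j 2 else 0)

theorem pvCf_length (n k : Int) : (pvCf n k).length = (n + 1 - 0).toNat := by
  simp [pvCf, PySem.List.length_pyRange_one]

theorem pvCf_getElem (n k : Int) (j : Nat) (h : j < (pvCf n k).length) :
    (pvCf n k)[j] = if 2 ≤ (j : Int) ∧ (j : Int) < k then PySem.Int.floordiv j 2 else 0 := by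
  simp [pvCf, PySem.List.getElem_pyRange_one]

theorem pvCf_init (n : Int) :
    Array.replicate (n + 1).toNat (0 : Int) = (pvCf n 2).toArray := by
  apply Array.ext'
  simp only [Array.toList_replicate]
  apply List.ext_getElem
  · simp [pvCf_length]
  · intro j h1 h2
    rw [List.getElem_replicate]
    show _ = (pvCf n 2)[j]
    rw [pvCf_getElem]
    split
    · omega
    · rfl

theorem pvMexAux_eq (s : Std.HashSet Int) (t : Int)
    (hmem : ∀ v, v ∈ s ↔ 0 ≤ v ∧ v < t) :
    ∀ (fuel : Nat) (m : Int), 0 ≤ m → m ≤ t → (t - m).toNat < fuel →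
      pvMexAux s fuel m = t := by
  intro fuel
  induction fuel with
  | zero => intro m _ _ h; omega
  | succ f ih =>
    intro m hm0 hmt hf
    by_cases h : m ∈ s
    · have := (hmem m).mp h
      simp only [pvMexAux, if_pos (Std.HashSet.contains_iff_mem.mpr h)]
      exact ih (m + 1) (by omega) (by omega) (by omega)
    · have hne : ¬ (0 ≤ m ∧ m < t) := fun hc => h ((hmem m).mpr hc)
      have hcf : s.contains m = false := by
        rw [← Bool.not_eq_true, Std.HashSet.contains_iff_mem]; exact h
      simp only [pvMexAux, hcf, Bool.false_eq_true, if_false]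
      omega

theorem pvMex_eq (s : Std.HashSet Int) (t : Int) (ht : 0 ≤ t)
    (hmem : ∀ v, v ∈ s ↔ 0 ≤ v ∧ v < t) : pvMex s = t := by
  have hsub : PySem.List.pyRange 0 t 1 ⊆ s.toList := by
    intro x hx
    rw [PySem.List.mem_pyRange_one] at hx
    exact Std.HashSet.mem_toList.mpr ((hmem x).mpr hx)
  have hnd : s.toList.Nodup :=
    (Std.HashSet.distinct_toList).imp (fun h => beq_eq_false_iff_ne.mp h)
  have hlen : t.toNat ≤ s.size := by
    have := (List.subperm_of_subset (PySem.List.nodup_pyRange_one 0 t) hsub).length_le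
    rw [PySem.List.length_pyRange_one, Std.HashSet.length_toList] at this
    simpa using this
  exact pvMexAux_eq s t hmem (s.size + 1) 0 le_rfl ht (by omega)

-- membership in the loop-built hash set
theorem pvMem_foldl_insert (l : List Int) (f : Int → Int) :
    ∀ (init : Std.HashSet Int) (v : Int),
      v ∈ l.foldl (fun r m => r.insert (f m)) init ↔ v ∈ init ∨ ∃ m ∈ l, f m = v := by
  induction l with
  | nil => simp
  | cons x xs ih =>
    intro init v
    rw [List.foldl_cons, ih]
    simp only [Std.HashSet.mem_insert, beq_iff_eq, List.mem_cons]
    constructor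
    · rintro ((h | h) | ⟨m, hm, rfl⟩)
      · exact Or.inr ⟨x, Or.inl rfl, h⟩
      · exact Or.inl h
      · exact Or.inr ⟨m, Or.inr hm, rfl⟩
    · rintro (h | ⟨m, (rfl | hm), rfl⟩)
      · exact Or.inl (Or.inr h)
      · exact Or.inl (Or.inl rfl)
      · exact Or.inr ⟨m, hm, rfl⟩

-- floor-halving bracket: 2 * (k // 2) ≤ k < 2 * (k // 2) + 2
theorem pvHalf_bracket (k : Int) :
    2 * PySem.Int.floordiv k 2 ≤ k ∧ k < 2 * PySem.Int.floordiv k 2 + 2 := by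
  have h1 := PySem.Int.floordiv_mul_add_mod k 2
  have h2 := PySem.Int.mod_nonneg k (b := 2) (by omega)
  have h3 := PySem.Int.mod_lt k (b := 2) (by omega)
  omega

theorem pvHalf_even (m : Int) (h : 2 ∣ m) : 2 * PySem.Int.floordiv m 2 = m := by
  have h1 := PySem.Int.floordiv_mul_add_mod m 2
  have h2 := (PySem.Int.mod_eq_zero_iff_dvd m 2).mpr h
  omega

-- the loop body sends the closed-form table at stage k to the table at stage k+1
theorem pvStepA_cf (n k : Int) (h2 : 2 ≤ k) (hk : k ≤ n) :
    pvStepA (pvCf n k).toArray k = (pvCf n (k + 1)).toArray := by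
  have hlen : ((pvCf n k).length : Int) = n + 1 := by
    rw [pvCf_length]; omega
  -- the entry of the table read at index k - move, for an admissible move
  have hread : ∀ move : Int, 2 ≤ move → move ≤ k → 2 ∣ move →
      (pvCf n k).toArray.getD (k - move).toNat 0
        = PySem.Int.floordiv k 2 - PySem.Int.floordiv move 2 := by
    intro move hm2 hmk hdvd
    have hj : (k - move).toNat < (pvCf n k).length := by omega
    rw [Array.getD_eq_getD_getElem?, List.getElem?_toArray, List.getElem?_eq_getElem hj]
    simp only [Option.getD_some]
    rw [pvCf_getElem]
    have hcast : (((k - move).toNat : Nat) : Int) = k - move := by omega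
    rw [hcast]
    have hbk := pvHalf_bracket k
    have hbkm := pvHalf_bracket (k - move)
    have hm := pvHalf_even move hdvd
    split
    · omega
    · -- k - move ∈ {0, 1}: the stored 0 equals k//2 - move//2
      omega
  unfold pvStepA
  set t := PySem.Int.floordiv k 2 with htdef
  have hbt := pvHalf_bracket k
  have hition : ∀ move ∈ PySem.List.pyRange 2 (k + 1) 2, ∀ r : Std.HashSet Int,
      (if 0 ≤ k - move then r.insert ((pvCf n k).toArray.getD (k - move).toNat 0) else r)
        = r.insert (t - PySem.Int.floordiv move 2) := by
    intro move hmv r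
    rw [PySem.List.mem_pyRange_iff_of_pos (by omega)] at hmv
    obtain ⟨hma, hmb, hmd⟩ := hmv
    have hdvd : 2 ∣ move := by omega
    rw [if_pos (by omega), hread move hma (by omega) hdvd]
  rw [PySem.List.foldl_congr_mem' _ _ _ _ hition]
  set s := (PySem.List.pyRange 2 (k + 1) 2).foldl
      (fun r move => r.insert (t - PySem.Int.floordiv move 2)) (∅ : Std.HashSet Int) with hsdef
  have hmem : ∀ v, v ∈ s ↔ 0 ≤ v ∧ v < t := by
    intro v
    rw [hsdef, pvMem_foldl_insert]
    simp only [Std.HashSet.not_mem_empty, false_or]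
    constructor
    · rintro ⟨move, hmv, rfl⟩
      rw [PySem.List.mem_pyRange_iff_of_pos (by omega)] at hmv
      obtain ⟨hma, hmb, hmd⟩ := hmv
      have hdvd : 2 ∣ move := by omega
      have := pvHalf_even move hdvd
      omega
    · rintro ⟨hv0, hvt⟩
      refine ⟨2 * (t - v), ?_, ?_⟩
      · rw [PySem.List.mem_pyRange_iff_of_pos (by omega)]
        refine ⟨by omega, by omega, by omega⟩
      · have := pvHalf_even (2 * (t - v)) ⟨t - v, by ring⟩
        omega
  rw [pvMex_eq s t (by omega) hmem]
  -- writing t at index k turns stage k into stage k+1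
  apply Array.ext'
  rw [Array.toList_setIfInBounds, List.toList_toArray, List.toList_toArray]
  apply List.ext_getElem
  · simp [pvCf_length]
  · intro j h1 h2'
    have h1' : j < (pvCf n k).length := by simpa [List.length_set] using h1
    have hjn : (j : Int) < n + 1 := by
      have := h1'; rw [pvCf_length] at this; omega
    rw [List.getElem_set, pvCf_getElem n (k + 1) j h2']
    by_cases hj : k.toNat = j
    · rw [if_pos hj]
      have hjk : (j : Int) = k := by omega
      rw [if_pos ⟨by omega, by omega⟩, htdef, hjk]
    · rw [if_neg hj, pvCf_getElem n k j h1']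
      have hne : (j : Int) ≠ k := by omega
      by_cases hc : 2 ≤ (j : Int) ∧ (j : Int) < k
      · rw [if_pos hc, if_pos ⟨hc.1, by omega⟩]
      · rw [if_neg hc, if_neg (by omega)]

theorem pvFold_cf (n : Int) :
    ∀ (d : Nat) (a : Int), 2 ≤ a → a = n + 1 - d →
      (PySem.List.pyRange a (n + 1) 1).foldl pvStepA (pvCf n a).toArray
        = (pvCf n (n + 1)).toArray := by
  intro d
  induction d with
  | zero =>
    intro a _ ha
    rw [PySem.List.pyRange_one_eq_nil (by omega)]
    simp; congr 1; omega
  | succ m ih =>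
    intro a ha2 had
    by_cases hend : n + 1 ≤ a
    · rw [PySem.List.pyRange_one_eq_nil hend]
      simp; congr 1; omega
    · rw [PySem.List.pyRange_one_cons (by omega)]
      rw [List.foldl_cons, pvStepA_cf n a ha2 (by omega)]
      exact ih (a + 1) (by omega) (by omega)

theorem pvCf_final (n : Int) :
    ((pvCf n (n + 1)).toArray.setIfInBounds 1 0).toList = calculate_even_nim_alt n := by
  rw [Array.toList_setIfInBounds, List.toList_toArray]
  apply List.ext_getElem
  · simp [pvCf_length, calculate_even_nim_alt, PySem.List.length_pyRange_one]
  · intro j h1 h2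
    have h1' : j < (pvCf n (n + 1)).length := by simpa [List.length_set] using h1
    have hjn : (j : Int) < n + 1 := by
      have := h1'; rw [pvCf_length] at this; omega
    have hrhs : (calculate_even_nim_alt n)[j] = PySem.Int.floordiv j 2 := by
      simp only [calculate_even_nim_alt, List.getElem_map]
      rw [PySem.List.getElem_pyRange_one]
      simp
    rw [List.getElem_set, hrhs]
    have hb := pvHalf_bracket (j : Int)
    by_cases hj : 1 = j
    · rw [if_pos hj]
      -- the written 0 equals j // 2 at j = 1
      omega
    · rw [if_neg hj, pvCf_getElem n (n + 1) j h1']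
      split
      · rfl
      · -- j = 0 here (j = 1 handled above): both sides are 0
        omega

-- ===== VERDICT (by name: the statement is the Claim_ definition above) =====
theorem calculate_even_nim_spec : Claim_equal_calculate_even_nim := by
  intro n _ hpre
  have hn : 1 ≤ n := hpre
  unfold Spec_calculate_even_nim calculate_even_nim
  show (((PySem.List.pyRange 2 (n + 1) 1).foldl pvStepA
      (Array.replicate (n + 1).toNat 0)).setIfInBounds 1 0).toList = calculate_even_nim_alt n
  rw [pvCf_init n]
  rw [pvFold_cf n (n - 1).toNat 2 le_rfl (by omega)]
  exact pvCf_final n
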